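-- pv_equiv track=rewrite | github.com/bioinformatics-company/gl1-seq | seqnft_pipeline.py | _kmer_key_nuc2
-- ===== SOURCE A (Python) =====
-- from typing import Any, Dict, Iterable, Iterator, List, Optional, Sequence, Tuple, Union
--
-- def _kmer_key_nuc2(kmer: str, canonical: bool) -> Optional[int]:
--     """
--     Encode an A/C/G/T kmer into a uint64 using 2-bit encoding.
--     Returns None if kmer contains non-ACGT.
--     """
--     km = kmer.upper()
--     v = 0
--     for ch in km:
--         v <<= 2
--         if ch == "A":
--             pass
--         elif ch == "C":
--             v |= 1
--         elif ch == "G":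
--             v |= 2
--         elif ch == "T":
--             v |= 3
--         else:
--             return None
--
--     if canonical:
--         # compute reverse complement key as well and take min
--         # Reverse complement of A/C/G/T
--         rc_v = 0
--         for ch in reversed(km):
--             rc_v <<= 2
--             if ch == "A":
--                 rc_v |= 3
--             elif ch == "C":
--                 rc_v |= 2
--             elif ch == "G":
--                 rc_v |= 1
--             elif ch == "T":
--                 rc_v |= 0
--         v = min(v, rc_v)
--     return v
-- ===== SOURCE B (Python) =====
-- def _kmer_key_nuc2(kmer: str, canonical: bool):
--     """
--     Encode an A/C/G/T kmer into a uint64 using 2-bit encoding.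
--     Returns None if kmer contains non-ACGT.
--     """
--     code = {"A": 0, "C": 1, "G": 2, "T": 3}
--     km = kmer.upper()
--     v = 0
--     for ch in km:
--         b = code.get(ch)
--         if b is None:
--             return None
--         v = (v << 2) | b
--     if canonical:
--         # derive the reverse-complement key from the packed integer:
--         # peel the low 2 bits, complement them, shift into rc
--         rc = 0
--         t = v
--         for _ in range(len(km)):
--             rc = (rc << 2) | (3 - (t & 3))
--             t >>= 2
--         v = min(v, rc)
--     return v
-- ===== Notes on version B (the rewrite author's own statement) =====
-- stated objective: alternative
-- what changed: B packs the forward key via a dict lookup and, for the canonical branch, derives the reverse-complement key arithmetically from the packed integer (peeling and complementing 2-bit groups) instead of re-scanning the reversed character string.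
import Mathlib
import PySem

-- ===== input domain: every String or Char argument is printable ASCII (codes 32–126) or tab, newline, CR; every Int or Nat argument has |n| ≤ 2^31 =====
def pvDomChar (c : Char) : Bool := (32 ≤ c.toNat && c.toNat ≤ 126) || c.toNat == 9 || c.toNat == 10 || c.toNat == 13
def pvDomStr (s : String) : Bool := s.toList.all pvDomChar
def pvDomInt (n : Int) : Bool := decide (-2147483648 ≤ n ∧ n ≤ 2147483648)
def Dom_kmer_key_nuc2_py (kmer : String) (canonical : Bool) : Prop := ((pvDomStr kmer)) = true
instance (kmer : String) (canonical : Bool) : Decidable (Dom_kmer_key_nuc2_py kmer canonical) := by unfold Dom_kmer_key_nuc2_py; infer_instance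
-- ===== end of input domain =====

-- B derives the canonical reverse-complement key arithmetically from the packed integer
-- (peeling/complementing 2-bit groups) instead of re-scanning the reversed string; objective: alternative.

-- ===== PORT A =====
-- one step of A's forward loop: v <<= 2 then the if/elif chain (| via PySem.Int.bor)
def pvA_step (v : Int) (c : Char) : Option Int :=
  if c = 'A' then some (v <<< (2:Nat))
  else if c = 'C' then some (PySem.Int.bor (v <<< (2:Nat)) 1)
  else if c = 'G' then some (PySem.Int.bor (v <<< (2:Nat)) 2)
  else if c = 'T' then some (PySem.Int.bor (v <<< (2:Nat)) 3)
  else none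

-- A's forward loop with its early `return None`
def pvA_fwd : List Char → Int → Option Int
  | [], v => some v
  | c :: cs, v =>
    match pvA_step v c with
    | none => none
    | some v' => pvA_fwd cs v'

-- one step of A's reverse-complement loop (no else branch: non-ACGT only shifts)
def pvA_rcStep (r : Int) (c : Char) : Int :=
  if c = 'A' then PySem.Int.bor (r <<< (2:Nat)) 3
  else if c = 'C' then PySem.Int.bor (r <<< (2:Nat)) 2
  else if c = 'G' then PySem.Int.bor (r <<< (2:Nat)) 1
  else if c = 'T' then PySem.Int.bor (r <<< (2:Nat)) 0
  else r <<< (2:Nat)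

def kmer_key_nuc2_py (kmer : String) (canonical : Bool) : Option Int :=
  match pvA_fwd (PySem.Str.upper kmer).toList 0 with
  | none => none
  | some v =>
    if canonical then
      some (min v ((PySem.Str.upper kmer).toList.reverse.foldl pvA_rcStep 0))
    else some v

-- ===== PORT B =====
-- B's code dict as a lookup function: code.get(ch)
def pvB_code (c : Char) : Option Int :=
  if c = 'A' then some 0
  else if c = 'C' then some 1
  else if c = 'G' then some 2
  else if c = 'T' then some 3
  else none

-- B's forward loop: v = (v << 2) | b, early return None when the dict lookup misses
def pvB_fwd : List Char → Int → Option Int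
  | [], v => some v
  | c :: cs, v =>
    match pvB_code c with
    | none => none
    | some b => pvB_fwd cs (PySem.Int.bor (v <<< (2:Nat)) b)

-- B's rc loop over the packed integer, run len(km) times:
-- rc = (rc << 2) | (3 - (t & 3)); t >>= 2
def pvB_rc : Nat → Int → Int → Int
  | 0, _, rc => rc
  | n + 1, t, rc =>
    pvB_rc n (t >>> (2:Nat)) (PySem.Int.bor (rc <<< (2:Nat)) (3 - PySem.Int.band t 3))

def kmer_key_nuc2_py_alt (kmer : String) (canonical : Bool) : Option Int :=
  match pvB_fwd (PySem.Str.upper kmer).toList 0 with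
  | none => none
  | some v =>
    if canonical then
      some (min v (pvB_rc (PySem.Str.upper kmer).toList.length v 0))
    else some v

-- ===== PRECONDITION & SPEC =====
def Spec_kmer_key_nuc2_py (kmer : String) (canonical : Bool) (out : Option Int) : Prop := out = kmer_key_nuc2_py_alt kmer canonical
instance (kmer : String) (canonical : Bool) (out : Option Int) : Decidable (Spec_kmer_key_nuc2_py kmer canonical out) := by unfold Spec_kmer_key_nuc2_py; infer_instance

-- ===== CLAIM (what is proved, stated in full; the proofs are below) =====
def Claim_equal_kmer_key_nuc2_py : Prop := ∀ (kmer : String) (canonical : Bool), Dom_kmer_key_nuc2_py kmer canonical → Spec_kmer_key_nuc2_py kmer canonical (kmer_key_nuc2_py kmer canonical)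

-- ===== LEMMAS AND PROOFS =====

-- proof-side helpers: the 2-bit code as a total Nat function, validity, packed value
def pvCo (c : Char) : Nat :=
  if c = 'A' then 0 else if c = 'C' then 1 else if c = 'G' then 2 else 3

def pvValid (c : Char) : Prop := c = 'A' ∨ c = 'C' ∨ c = 'G' ∨ c = 'T'

def pvF (n : Nat) (l : List Char) : Nat := l.foldl (fun a c => a * 4 + pvCo c) n

theorem pvCo_lt (c : Char) : pvCo c < 4 := by
  unfold pvCo; split_ifs <;> omega

theorem pvShl2 (v : Int) : v <<< (2 : Nat) = v * 4 := by
  rw [Int.shiftLeft_eq]; norm_num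

-- (v << 2) | b for a nonnegative v and 0 ≤ b < 4 is exactly 4*v + b
theorem pvBor (m b : Nat) (hb : b < 4) :
    PySem.Int.bor (((m : Nat) : Int) <<< (2 : Nat)) ((b : Nat) : Int)
      = ((m * 4 + b : Nat) : Int) := by
  have h1 : ((m : Nat) : Int) <<< (2 : Nat) = ((m * 4 : Nat) : Int) := by
    rw [pvShl2]; norm_cast
  rw [h1, PySem.Int.bor_natCast]
  congr 1
  rw [show m * 4 = m <<< 2 from by rw [Nat.shiftLeft_eq],
    ← Nat.shiftLeft_add_eq_or_of_lt hb m]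

-- the two forward scans compute the same option value
theorem pv_fwd_eq : ∀ (l : List Char) (v : Int), pvA_fwd l v = pvB_fwd l v := by
  intro l
  induction l with
  | nil => intro v; rfl
  | cons c cs ih =>
    intro v
    simp only [pvA_fwd, pvB_fwd, pvA_step, pvB_code]
    split_ifs <;> simp [PySem.Int.bor_zero, ih]

-- B's forward scan succeeds exactly on ACGT strings and packs pvF
theorem pv_fwd_char : ∀ (l : List Char) (n : Nat) (v : Int),
    pvB_fwd l ((n : Nat) : Int) = some v → (∀ c ∈ l, pvValid c) ∧ v = ((pvF n l : Nat) : Int) := by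
  intro l
  induction l with
  | nil =>
    intro n v h
    simp only [pvB_fwd, Option.some.injEq] at h
    exact ⟨by simp, by simp [pvF, ← h]⟩
  | cons c cs ih =>
    intro n v h
    cases hc : pvB_code c with
    | none => simp [pvB_fwd, hc] at h
    | some b =>
      have hval : pvValid c ∧ b = ((pvCo c : Nat) : Int) := by
        unfold pvB_code at hc
        unfold pvValid pvCo
        split_ifs at hc with h1 h2 h3 h4 <;> simp_all
      have h' : pvB_fwd cs (PySem.Int.bor (((n : Nat) : Int) <<< (2:Nat)) b) = some v := by
        simpa [pvB_fwd, hc] using h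
      rw [hval.2, pvBor n (pvCo c) (pvCo_lt c)] at h'
      obtain ⟨hall, hv⟩ := ih (n * 4 + pvCo c) v h'
      refine ⟨?_, ?_⟩
      · intro d hd
        rcases List.mem_cons.mp hd with rfl | hd'
        · exact hval.1
        · exact hall d hd'
      · rw [hv]; rfl

-- on a valid string, B's integer-peeling rc loop equals A's reversed character scan
theorem pv_rc_eq : ∀ (l : List Char), (∀ c ∈ l, pvValid c) → ∀ (r : Nat),
    pvB_rc l.length ((pvF 0 l : Nat) : Int) ((r : Nat) : Int)
      = l.reverse.foldl pvA_rcStep ((r : Nat) : Int) := by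
  intro l
  induction l using List.reverseRecOn with
  | nil => intro _ r; rfl
  | append_singleton l' c ih =>
    intro hall r
    have hvc : pvValid c := hall c (by simp)
    have hall' : ∀ d ∈ l', pvValid d := fun d hd => hall d (by simp [hd])
    have hco := pvCo_lt c
    have hF : pvF 0 (l' ++ [c]) = pvF 0 l' * 4 + pvCo c := by
      simp [pvF, List.foldl_append]
    have hlen : (l' ++ [c]).length = l'.length + 1 := by simp
    rw [hlen, hF]
    have hband : PySem.Int.band (((pvF 0 l' * 4 + pvCo c : Nat)) : Int) 3
        = ((pvCo c : Nat) : Int) := by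
      rw [show (3:Int) = ((3:Nat):Int) from rfl, PySem.Int.band_natCast]
      congr 1
      rw [Nat.and_two_pow_sub_one_eq_mod _ 2]
      omega
    have hshr : (((pvF 0 l' * 4 + pvCo c : Nat)) : Int) >>> (2 : Nat)
        = ((pvF 0 l' : Nat) : Int) := by
      have hn : (pvF 0 l' * 4 + pvCo c) >>> 2 = pvF 0 l' := by
        rw [Nat.shiftRight_eq_div_pow]; omega
      calc (((pvF 0 l' * 4 + pvCo c : Nat)) : Int) >>> (2 : Nat)
          = (((pvF 0 l' * 4 + pvCo c) >>> 2 : Nat) : Int) := rfl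
        _ = ((pvF 0 l' : Nat) : Int) := by rw [hn]
    have h3cast : (3 : Int) - ((pvCo c : Nat) : Int) = (((3 - pvCo c : Nat)) : Int) := by
      push_cast [Nat.cast_sub (by omega : pvCo c ≤ 3)]; ring
    have hborstep : PySem.Int.bor (((r : Nat) : Int) <<< (2:Nat)) ((3:Int) - ((pvCo c : Nat) : Int))
        = ((r * 4 + (3 - pvCo c) : Nat) : Int) := by
      rw [h3cast, pvBor r (3 - pvCo c) (by omega)]
    have hA : pvA_rcStep ((r : Nat) : Int) c = ((r * 4 + (3 - pvCo c) : Nat) : Int) := by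
      rcases hvc with h | h | h | h
      · subst h
        rw [show pvA_rcStep ((r:Nat):Int) 'A'
              = PySem.Int.bor (((r:Nat):Int) <<< (2:Nat)) ((3:Nat):Int) from rfl,
           pvBor r 3 (by omega), show pvCo 'A' = 0 from rfl]
      · subst h
        rw [show pvA_rcStep ((r:Nat):Int) 'C'
              = PySem.Int.bor (((r:Nat):Int) <<< (2:Nat)) ((2:Nat):Int) from rfl,
           pvBor r 2 (by omega), show pvCo 'C' = 1 from rfl]
      · subst h
        rw [show pvA_rcStep ((r:Nat):Int) 'G'
              = PySem.Int.bor (((r:Nat):Int) <<< (2:Nat)) ((1:Nat):Int) from rfl,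
           pvBor r 1 (by omega), show pvCo 'G' = 2 from rfl]
      · subst h
        rw [show pvA_rcStep ((r:Nat):Int) 'T'
              = PySem.Int.bor (((r:Nat):Int) <<< (2:Nat)) ((0:Nat):Int) from rfl,
           pvBor r 0 (by omega), show pvCo 'T' = 3 from rfl]
    have hrec : pvB_rc (l'.length + 1) (((pvF 0 l' * 4 + pvCo c : Nat)) : Int) ((r : Nat) : Int)
        = pvB_rc l'.length ((pvF 0 l' : Nat) : Int) ((r * 4 + (3 - pvCo c) : Nat) : Int) := by
      simp only [pvB_rc]
      rw [hband, hshr, hborstep]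
    rw [hrec, ih hall' (r * 4 + (3 - pvCo c))]
    simp only [List.reverse_append, List.reverse_singleton, List.singleton_append,
      List.foldl_cons]
    rw [hA]

-- ===== VERDICT (by name: the statement is the Claim_ definition above) =====
theorem kmer_key_nuc2_py_spec : Claim_equal_kmer_key_nuc2_py := by
  intro kmer canonical _
  unfold Spec_kmer_key_nuc2_py kmer_key_nuc2_py kmer_key_nuc2_py_alt
  rw [pv_fwd_eq]
  cases h : pvB_fwd (PySem.Str.upper kmer).toList 0 with
  | none => rfl
  | some v =>
    have h' : pvB_fwd (PySem.Str.upper kmer).toList (((0:Nat) : Nat) : Int) = some v := h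
    obtain ⟨hall, hv⟩ := pv_fwd_char _ 0 v h'
    cases canonical with
    | false => rfl
    | true =>
      have hrc := pv_rc_eq _ hall 0
      show some (min v ((PySem.Str.upper kmer).toList.reverse.foldl pvA_rcStep 0))
        = some (min v (pvB_rc (PySem.Str.upper kmer).toList.length v 0))
      rw [hv]
      rw [show (0:Int) = ((0:Nat):Int) from rfl, ← hrc]
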